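-- pv_equiv track=rewrite | github.com/AfidAzwad/problemsolving-in-Python-nd-Go | Missing Characters/missingchar.py | missingCharacters
-- ===== SOURCE A (Python) =====
-- import string
--
-- def missingCharacters(s):
--
--     duplicateremoved = list(set(s))
--
--     alphabet_string = list(string.ascii_lowercase)
--
--     numeric_list = []
--
--     for i in range(0, 10):
--         numeric_list.append(str(i)) # adding 0 to 9 as string
--
--     for i in range(len(duplicateremoved)):
--         if duplicateremoved[i]>= 'a' and duplicateremoved[i] <= 'z': # checking a to z
--             alphabet_string.remove(duplicateremoved[i])
--         elif duplicateremoved[i]>= '0' and duplicateremoved[i] <= '9': # checking 0 to 9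
--             numeric_list.remove(duplicateremoved[i])
--
--     str1 = ""
--     str2 = ""
--
--     return str2.join(numeric_list)+str1.join(alphabet_string)
-- ===== SOURCE B (Python) =====
-- import string
--
-- def missingCharacters(s):
--     seen = set(s)
--     return (''.join(d for d in string.digits if d not in seen)
--             + ''.join(c for c in string.ascii_lowercase if c not in seen))
-- ===== Notes on version B (the rewrite author's own statement) =====
-- stated objective: simpler
-- what changed: B scans the fixed digit/letter alphabets once, keeping those absent from set(s), instead of A's loop over the input's distinct characters that mutates two full lists via list.remove (a linear inner scan each time).
import Mathlib
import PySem

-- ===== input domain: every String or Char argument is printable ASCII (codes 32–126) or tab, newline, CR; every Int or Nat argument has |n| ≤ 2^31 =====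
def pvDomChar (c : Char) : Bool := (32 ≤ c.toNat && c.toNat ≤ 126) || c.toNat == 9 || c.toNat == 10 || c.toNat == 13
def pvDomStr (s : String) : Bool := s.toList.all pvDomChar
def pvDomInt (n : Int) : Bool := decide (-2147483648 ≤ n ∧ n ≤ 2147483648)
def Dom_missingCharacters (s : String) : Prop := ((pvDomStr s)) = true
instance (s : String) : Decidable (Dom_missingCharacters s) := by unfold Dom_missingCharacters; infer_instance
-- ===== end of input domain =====

-- B replaces A's loop over the input's distinct characters (mutating two full lists with
-- list.remove) by one filtering pass over the fixed digit and lowercase alphabets.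

-- ===== PORT A =====
-- Literal port of A.  list(set(s)) is PySem.Set.ofList; the result of the loop does not depend
-- on the set's iteration order (each removal deletes a distinct element from a fixed list), so
-- consuming the Set's elements here is order-safe.  str(i) for i in range(0,10) is the single
-- digit character chr(48+i) — exact on this range.  'for i in range(len(xs)): … xs[i] …' over the
-- whole list is the structural fold.  list.remove is PySem.List.remove?; its none branch
-- (Python's ValueError) is unreachable here because each removed character is still present.
def missingCharacters (s : String) : String :=
  let duplicateremoved : PySem.Set Char := PySem.Set.ofList s.toList
  let alphabetString : List Char := "abcdefghijklmnopqrstuvwxyz".toList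
  let numericList : List Char :=
    (PySem.List.pyRange 0 10 1).foldl (fun acc i => acc ++ [Char.ofNat (48 + i.toNat)]) []
  let st := duplicateremoved.foldl
    (fun (st : List Char × List Char) c =>
      if 'a' ≤ c ∧ c ≤ 'z' then ((PySem.List.remove? st.1 c).getD st.1, st.2)
      else if '0' ≤ c ∧ c ≤ '9' then (st.1, (PySem.List.remove? st.2 c).getD st.2)
      else st)
    (alphabetString, numericList)
  String.mk (st.2 ++ st.1)

-- ===== PORT B =====
def missingCharacters_alt (s : String) : String :=
  let seen : PySem.Set Char := PySem.Set.ofList s.toList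
  String.mk
    (("0123456789".toList.filter (fun d => !seen.contains d)) ++
     ("abcdefghijklmnopqrstuvwxyz".toList.filter (fun c => !seen.contains c)))

-- ===== PRECONDITION & SPEC =====
def Spec_missingCharacters (s : String) (out : String) : Prop := out = missingCharacters_alt s
instance (s : String) (out : String) : Decidable (Spec_missingCharacters s out) := by unfold Spec_missingCharacters; infer_instance

-- ===== CLAIM (what is proved, stated in full; the proofs are below) =====
def Claim_equal_missingCharacters : Prop := ∀ (s : String), Dom_missingCharacters s → Spec_missingCharacters s (missingCharacters s)

-- ===== LEMMAS AND PROOFS =====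

-- list.remove's total form is List.erase (remove? deletes the first occurrence when present,
-- and erase of an absent element is the identity).
theorem removeD_eq_erase (l : List Char) (c : Char) :
    (PySem.List.remove? l c).getD l = l.erase c := by
  by_cases h : c ∈ l
  · rw [PySem.List.remove?_eq_some_erase _ _ h]; rfl
  · rw [(PySem.List.remove?_eq_none_iff l c).2 h, Option.getD_none, List.erase_of_not_mem h]

-- A's loop updates the two lists independently, so it splits into two folds.
theorem foldl_pair (ds : List Char) : ∀ (a n : List Char),
    ds.foldl
      (fun (st : List Char × List Char) c =>
        if 'a' ≤ c ∧ c ≤ 'z' then ((PySem.List.remove? st.1 c).getD st.1, st.2)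
        else if '0' ≤ c ∧ c ≤ '9' then (st.1, (PySem.List.remove? st.2 c).getD st.2)
        else st)
      (a, n)
    = (ds.foldl (fun acc c => if 'a' ≤ c ∧ c ≤ 'z' then acc.erase c else acc) a,
       ds.foldl (fun acc c =>
         if ¬('a' ≤ c ∧ c ≤ 'z') ∧ ('0' ≤ c ∧ c ≤ '9') then acc.erase c else acc) n) := by
  induction ds with
  | nil => intro a n; rfl
  | cons c ds ih =>
    intro a n
    simp only [List.foldl_cons]
    by_cases h1 : 'a' ≤ c ∧ c ≤ 'z'
    · rw [if_pos h1, ih]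
      simp [removeD_eq_erase, h1]
    · by_cases h2 : '0' ≤ c ∧ c ≤ '9'
      · rw [if_neg h1, if_pos h2, ih]
        simp [removeD_eq_erase, h1, h2]
      · rw [if_neg h1, if_neg h2, ih]
        simp [h1, h2]

-- Folding conditional erasures of distinct elements over a Nodup list is a filter.
theorem foldl_erase_filter (p : Char → Prop) [DecidablePred p] :
    ∀ (ds l : List Char), l.Nodup →
    ds.foldl (fun acc c => if p c then acc.erase c else acc) l
      = l.filter (fun x => !(decide (p x) && ds.contains x)) := by
  intro ds
  induction ds with
  | nil => intro l _; simp
  | cons c ds ih =>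
    intro l hl
    simp only [List.foldl_cons]
    by_cases hp : p c
    · rw [if_pos hp, ih _ (hl.erase c), hl.erase_eq_filter c, List.filter_filter]
      refine List.filter_congr ?_
      intro x _
      by_cases hx : x = c
      · subst hx; simp [hp]
      · simp [hx]
    · rw [if_neg hp, ih _ hl]
      refine List.filter_congr ?_
      intro x _
      by_cases hx : x = c
      · subst hx; simp [hp]
      · simp [hx]

-- A's hand-built list of digit characters is the digit string.
theorem numericList_eq :
    (PySem.List.pyRange 0 10 1).foldl (fun acc i => acc ++ [Char.ofNat (48 + i.toNat)]) []
      = "0123456789".toList := by decide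

-- ===== VERDICT (by name: the statement is the Claim_ definition above) =====
theorem missingCharacters_spec : Claim_equal_missingCharacters := by
  intro s _
  unfold Spec_missingCharacters missingCharacters missingCharacters_alt
  simp only [numericList_eq, foldl_pair,
    foldl_erase_filter (fun c => 'a' ≤ c ∧ c ≤ 'z'),
    foldl_erase_filter (fun c => ¬('a' ≤ c ∧ c ≤ 'z') ∧ ('0' ≤ c ∧ c ≤ '9')),
    (by decide : ("0123456789".toList).Nodup),
    (by decide : ("abcdefghijklmnopqrstuvwxyz".toList).Nodup)]
  congr 2
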